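-- pv_equiv track=rewrite | github.com/ikaragyulieva/PycharmProjects | Python Advanced/Exam Preparation/Past Exam Problems/22_01_reg_exam_02_pawn_wars.py | is_captured
-- ===== SOURCE A (Python) =====
-- def is_in_range(row, col, range_to_check):
--     return 0 <= row < range_to_check and 0 <= col < range_to_check
--
-- def is_captured(attacking, defending, directions):
--     for direction in directions:
--         checking_row = attacking[0] + direction[0]
--         checking_col = attacking[1] + direction[1]
--         if not is_in_range(checking_row, checking_col, BOARD_RANGE):
--             continue
--         if checking_row == defending[0] and checking_col == defending[1]:
--             return checking_row, checking_col
--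
-- BOARD_RANGE = 8
-- ===== SOURCE B (Python) =====
-- BOARD_RANGE = 8
--
-- def is_in_range(row, col, range_to_check):
--     return 0 <= row < range_to_check and 0 <= col < range_to_check
--
-- def is_captured(attacking, defending, directions):
--     delta = (defending[0] - attacking[0], defending[1] - attacking[1])
--     if delta in directions and is_in_range(defending[0], defending[1], BOARD_RANGE):
--         return defending[0], defending[1]
--     return None
-- ===== Notes on version B (the rewrite author's own statement) =====
-- stated objective: simpler
-- what changed: Replaces the generate-and-test loop over directions (adding each direction to the attacker and comparing) by computing the single difference vector defending - attacking and testing its membership in directions plus one in-range check on the defender.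
import Mathlib
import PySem

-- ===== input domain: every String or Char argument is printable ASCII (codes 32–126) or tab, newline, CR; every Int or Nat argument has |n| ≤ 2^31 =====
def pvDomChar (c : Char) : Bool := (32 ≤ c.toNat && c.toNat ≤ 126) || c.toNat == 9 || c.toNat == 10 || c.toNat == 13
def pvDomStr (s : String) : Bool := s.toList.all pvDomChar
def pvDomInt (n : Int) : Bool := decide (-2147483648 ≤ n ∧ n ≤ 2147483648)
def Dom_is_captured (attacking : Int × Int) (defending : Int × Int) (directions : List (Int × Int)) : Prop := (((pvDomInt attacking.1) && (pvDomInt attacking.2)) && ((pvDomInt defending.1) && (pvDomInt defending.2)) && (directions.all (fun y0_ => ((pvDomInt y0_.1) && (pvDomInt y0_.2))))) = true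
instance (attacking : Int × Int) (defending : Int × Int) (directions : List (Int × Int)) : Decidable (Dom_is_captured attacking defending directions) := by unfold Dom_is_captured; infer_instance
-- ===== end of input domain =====

-- ===== PORT A =====
-- B replaces A's generate-and-test loop by one difference vector and a membership test; same O(n), simpler.
def pyIsInRange (row col range_to_check : Int) : Bool :=
  (0 ≤ row && row < range_to_check) && (0 ≤ col && col < range_to_check)

def is_captured (attacking : Int × Int) (defending : Int × Int) (directions : List (Int × Int)) : Option (Int × Int) :=
  match directions with
  | [] => none
  | direction :: rest =>
    let checking_row := attacking.1 + direction.1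
    let checking_col := attacking.2 + direction.2
    if ¬ pyIsInRange checking_row checking_col 8 then
      is_captured attacking defending rest
    else if checking_row = defending.1 ∧ checking_col = defending.2 then
      some (checking_row, checking_col)
    else
      is_captured attacking defending rest

-- ===== PORT B =====
def is_captured_alt (attacking : Int × Int) (defending : Int × Int) (directions : List (Int × Int)) : Option (Int × Int) :=
  let delta : Int × Int := (defending.1 - attacking.1, defending.2 - attacking.2)
  if delta ∈ directions ∧ pyIsInRange defending.1 defending.2 8 then
    some (defending.1, defending.2)
  else
    none

-- ===== PRECONDITION & SPEC =====
def Spec_is_captured (attacking : Int × Int) (defending : Int × Int) (directions : List (Int × Int)) (out : Option (Int × Int)) : Prop := out = is_captured_alt attacking defending directions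
instance (attacking : Int × Int) (defending : Int × Int) (directions : List (Int × Int)) (out : Option (Int × Int)) : Decidable (Spec_is_captured attacking defending directions out) := by unfold Spec_is_captured; infer_instance

-- ===== CLAIM (what is proved, stated in full; the proofs are below) =====
def Claim_equal_is_captured : Prop := ∀ (attacking : Int × Int) (defending : Int × Int) (directions : List (Int × Int)), Dom_is_captured attacking defending directions → Spec_is_captured attacking defending directions (is_captured attacking defending directions)

-- ===== LEMMAS AND PROOFS =====
theorem is_captured_eq_alt (attacking defending : Int × Int) (directions : List (Int × Int)) :
    is_captured attacking defending directions = is_captured_alt attacking defending directions := by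
  induction directions with
  | nil => simp [is_captured, is_captured_alt]
  | cons d rest ih =>
    simp only [is_captured, is_captured_alt] at ih ⊢
    by_cases hd : (defending.1 - attacking.1, defending.2 - attacking.2) = d
    · have h1 : attacking.1 + d.1 = defending.1 := by rw [← hd]; ring
      have h2 : attacking.2 + d.2 = defending.2 := by rw [← hd]; ring
      by_cases hr : pyIsInRange (attacking.1 + d.1) (attacking.2 + d.2) 8
      · have hr' : pyIsInRange defending.1 defending.2 8 = true := by rw [← h1, ← h2]; exact hr
        simp [h1, h2, hd, hr']
      · have hr' : pyIsInRange defending.1 defending.2 8 = false := by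
          rw [← h1, ← h2]; exact Bool.not_eq_true _ ▸ (by simpa using hr)
        rw [ih]
        simp [hr, hr']
    · have hne : ¬ (attacking.1 + d.1 = defending.1 ∧ attacking.2 + d.2 = defending.2) := by
        intro h
        apply hd
        obtain ⟨ha, hb⟩ := h
        ext <;> simp <;> omega
      rw [ih]
      by_cases hr : pyIsInRange (attacking.1 + d.1) (attacking.2 + d.2) 8
      · simp [hr, hne, List.mem_cons, hd]
      · simp [hr, List.mem_cons, hd]

-- ===== VERDICT (by name: the statement is the Claim_ definition above) =====
theorem is_captured_spec : Claim_equal_is_captured := by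
  intro attacking defending directions _
  unfold Spec_is_captured
  exact is_captured_eq_alt attacking defending directions
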